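-- pv_equiv track=rewrite | github.com/EnvyW6567/CodingTestAlgorithm | Wanted_CodingTest/DonutPlanet.py | hashPlanet
-- ===== SOURCE A (Python) =====
-- def lrud(r, c, N, M, planet):
--     node = []
--     if r-1 >= 0:
--         if planet[r-1][c] != 1:
--             node.append([r-1, c])
--     else :
--         if planet[N-1][c] != 1:
--             node.append([N-1, c])
--
--     if r+1 < N:
--         if planet[r+1][c] != 1:
--             node.append([r+1, c])
--     else :
--         if planet[0][c] != 1:
--             node.append([0, c])
--
--     if c+1 < M:
--         if planet[r][c+1] != 1:
--             node.append([r, c+1])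
--     else :
--         if planet[r][0] != 1:
--             node.append([r, 0])
--
--     if c-1 >= 0:
--         if planet[r][c-1] != 1:
--             node.append([r, c-1])
--     else :
--         if planet[r][M-1] != 1:
--             node.append([r, M-1])
--     return node
--
-- def hashPlanet(N, M, planet):
--     newPlanet = [[[]for _ in range(M)]for _ in range(N)]
--     for r in range(N):
--         for c in range(M):
--             if planet[r][c] == 0:
--                 for n in lrud(r, c, N, M, planet):
--                     newPlanet[r][c].append(n)
--     return newPlanet
--
-- planet = []
-- ===== SOURCE B (Python) =====
-- def hashPlanet(N, M, planet):
--     # Direction-major: four staged whole-grid passes, each producing an Option-grid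
--     # of that direction's single candidate neighbor, merged cell-wise at the end.
--     def sweep(dr, dc):
--         g = []
--         for r in range(N):
--             nr = (r + dr) % N
--             row = []
--             for c in range(M):
--                 nc = (c + dc) % M
--                 row.append([nr, nc] if planet[r][c] == 0 and planet[nr][nc] != 1 else None)
--             g.append(row)
--         return g
--     passes = [sweep(dr, dc) for dr, dc in ((-1, 0), (1, 0), (0, 1), (0, -1))]
--     return [[[p[r][c] for p in passes if p[r][c] is not None]
--              for c in range(M)] for r in range(N)]
-- ===== Notes on version B (the rewrite author's own statement) =====
-- stated objective: alternative
-- what changed: Cell-major single pass with an eight-branch neighbor helper is replaced by a direction-major staged algorithm: four whole-grid sweeps each build an Option-grid of one direction's candidate neighbor (toroidal wrap by modulo), and a final merge pass concatenates the four option grids cell-wise in up/down/right/left order.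
import Mathlib
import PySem

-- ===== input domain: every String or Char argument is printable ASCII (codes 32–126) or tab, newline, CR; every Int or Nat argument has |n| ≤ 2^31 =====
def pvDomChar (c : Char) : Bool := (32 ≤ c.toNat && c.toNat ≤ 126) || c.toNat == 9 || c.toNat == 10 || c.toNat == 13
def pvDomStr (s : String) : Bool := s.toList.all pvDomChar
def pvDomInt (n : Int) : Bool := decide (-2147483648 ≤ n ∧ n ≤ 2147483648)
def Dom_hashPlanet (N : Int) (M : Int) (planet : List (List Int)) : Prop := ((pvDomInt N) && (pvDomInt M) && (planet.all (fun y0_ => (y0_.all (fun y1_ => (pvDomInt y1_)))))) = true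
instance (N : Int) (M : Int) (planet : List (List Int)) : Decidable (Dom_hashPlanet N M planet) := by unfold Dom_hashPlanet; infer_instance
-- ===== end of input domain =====

-- B replaces A's cell-major pass with its eight-branch lrud helper by a direction-major
-- staged algorithm: four whole-grid sweeps build Option-grids of per-direction candidate
-- neighbors, merged cell-wise at the end (alternative decomposition; same cost).

-- shared cell access: planet[i][j] (total form; Pre_ keeps the indices in range)
def pvAt (planet : List (List Int)) (i j : Int) : Int :=
  PySem.List.pyGetD (PySem.List.pyGetD planet i []) j 0

-- ===== PORT A =====
def lrud (r c N M : Int) (planet : List (List Int)) : List (List Int) :=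
  let node : List (List Int) := []
  let node := if r - 1 ≥ 0 then
      (if pvAt planet (r-1) c ≠ 1 then node ++ [[r-1, c]] else node)
    else
      (if pvAt planet (N-1) c ≠ 1 then node ++ [[N-1, c]] else node)
  let node := if r + 1 < N then
      (if pvAt planet (r+1) c ≠ 1 then node ++ [[r+1, c]] else node)
    else
      (if pvAt planet 0 c ≠ 1 then node ++ [[0, c]] else node)
  let node := if c + 1 < M then
      (if pvAt planet r (c+1) ≠ 1 then node ++ [[r, c+1]] else node)
    else
      (if pvAt planet r 0 ≠ 1 then node ++ [[r, 0]] else node)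
  let node := if c - 1 ≥ 0 then
      (if pvAt planet r (c-1) ≠ 1 then node ++ [[r, c-1]] else node)
    else
      (if pvAt planet r (M-1) ≠ 1 then node ++ [[r, M-1]] else node)
  node

def hashPlanet (N : Int) (M : Int) (planet : List (List Int)) : List (List (List (List Int))) :=
  (PySem.List.pyRange 0 N 1).map (fun r =>
    (PySem.List.pyRange 0 M 1).map (fun c =>
      if pvAt planet r c = 0 then
        (lrud r c N M planet).foldl (fun acc n => acc ++ [n]) []
      else []))

-- ===== PORT B =====
-- cell access into an Option-grid: p[r][c] (indices are in range whenever read)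
def pvAtO (p : List (List (Option (List Int)))) (i j : Int) : Option (List Int) :=
  PySem.List.pyGetD (PySem.List.pyGetD p i []) j none

-- one direction's whole-grid sweep
def sweep (dr dc N M : Int) (planet : List (List Int)) : List (List (Option (List Int))) :=
  (PySem.List.pyRange 0 N 1).map (fun r =>
    let nr := PySem.Int.mod (r + dr) N
    (PySem.List.pyRange 0 M 1).map (fun c =>
      let nc := PySem.Int.mod (c + dc) M
      if pvAt planet r c = 0 ∧ pvAt planet nr nc ≠ 1 then some [nr, nc] else none))

def hashPlanet_alt (N : Int) (M : Int) (planet : List (List Int)) : List (List (List (List Int))) :=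
  let passes := [((-1 : Int), (0 : Int)), (1, 0), (0, 1), (0, -1)].map
    (fun d => sweep d.1 d.2 N M planet)
  (PySem.List.pyRange 0 N 1).map (fun r =>
    (PySem.List.pyRange 0 M 1).map (fun c =>
      passes.filterMap (fun p => pvAtO p r c)))

-- ===== PRECONDITION & SPEC =====
-- Pre_ is exactly where Python A returns: either the column range is empty (no cell is ever
-- indexed), or the grid has at least N rows whose first N rows each have at least M entries
-- (A raises IndexError otherwise).
def Pre_hashPlanet (N : Int) (M : Int) (planet : List (List Int)) : Prop :=
  M ≤ 0 ∨ (N ≤ (planet.length : Int) ∧ ∀ row ∈ planet.take N.toNat, M ≤ (row.length : Int))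
instance (N : Int) (M : Int) (planet : List (List Int)) : Decidable (Pre_hashPlanet N M planet) := by
  unfold Pre_hashPlanet; infer_instance

def pvWitness_hashPlanet : Int × Int × List (List Int) := (2, 2, [[0, 1], [1, 0]])

def Spec_hashPlanet (N : Int) (M : Int) (planet : List (List Int)) (out : List (List (List (List Int)))) : Prop := out = hashPlanet_alt N M planet
instance (N : Int) (M : Int) (planet : List (List Int)) (out : List (List (List (List Int)))) : Decidable (Spec_hashPlanet N M planet out) := by unfold Spec_hashPlanet; infer_instance

-- ===== CLAIM (what is proved, stated in full; the proofs are below) =====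
def Claim_equal_hashPlanet : Prop := ∀ (N : Int) (M : Int) (planet : List (List Int)), Dom_hashPlanet N M planet → Pre_hashPlanet N M planet → Spec_hashPlanet N M planet (hashPlanet N M planet)

-- ===== LEMMAS AND PROOFS =====

-- Python mod is determined by the quotient-remainder decomposition with 0 ≤ t < N.
lemma pymod_eq_of (x N t k : Int) (hN : 0 < N) (ht : 0 ≤ t) (htN : t < N)
    (hk : x = k * N + t) : PySem.Int.mod x N = t := by
  have h1 := PySem.Int.mod_nonneg x hN
  have h2 := PySem.Int.mod_lt x hN
  have h3 := PySem.Int.floordiv_mul_add_mod x N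
  have hd : N ∣ (PySem.Int.mod x N - t) :=
    ⟨k - PySem.Int.floordiv x N, by linarith⟩
  have habs : |PySem.Int.mod x N - t| < N := abs_sub_lt_iff.mpr ⟨by omega, by omega⟩
  have hz := Int.eq_zero_of_abs_lt_dvd hd habs
  omega

-- one candidate neighbor's contribution
def piece (planet : List (List Int)) (p : Int × Int) : List (List Int) :=
  if pvAt planet p.1 p.2 ≠ 1 then [[p.1, p.2]] else []

-- A's append chain, as a concatenation of four independent pieces
lemma lrud_eq (r c N M : Int) (planet : List (List Int)) :
    lrud r c N M planet =
      piece planet ((if r - 1 ≥ 0 then r - 1 else N - 1), c) ++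
      piece planet ((if r + 1 < N then r + 1 else 0), c) ++
      piece planet (r, (if c + 1 < M then c + 1 else 0)) ++
      piece planet (r, (if c - 1 ≥ 0 then c - 1 else M - 1)) := by
  by_cases hA : r - 1 ≥ 0 <;> by_cases hB : r + 1 < N <;>
    by_cases hC : c + 1 < M <;> by_cases hD : c - 1 ≥ 0 <;>
      (simp only [lrud, piece, hA, hB, hC, hD, if_true, if_false]; split_ifs <;> simp)

-- reading one cell of a sweep grid, for in-range indices
lemma sweep_at (dr dc N M r c : Int) (planet : List (List Int))
    (hr0 : 0 ≤ r) (hrN : r < N) (hc0 : 0 ≤ c) (hcM : c < M) :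
    pvAtO (sweep dr dc N M planet) r c =
      if pvAt planet r c = 0 ∧
         pvAt planet (PySem.Int.mod (r + dr) N) (PySem.Int.mod (c + dc) M) ≠ 1 then
        some [PySem.Int.mod (r + dr) N, PySem.Int.mod (c + dc) M]
      else none := by
  unfold pvAtO sweep
  rw [PySem.List.pyGetD_map_pyRange_of_nonneg _ N r _ hr0 hrN,
      PySem.List.pyGetD_map_pyRange_of_nonneg _ M c _ hc0 hcM]

-- B's merged cell, as the same concatenation of four pieces (modulo-wrapped indices)
lemma alt_cell_eq (N M r c : Int) (planet : List (List Int))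
    (hr0 : 0 ≤ r) (hrN : r < N) (hc0 : 0 ≤ c) (hcM : c < M) :
    ([((-1 : Int), (0 : Int)), (1, 0), (0, 1), (0, -1)].map
        (fun d => sweep d.1 d.2 N M planet)).filterMap (fun p => pvAtO p r c) =
      if pvAt planet r c = 0 then
        piece planet (PySem.Int.mod (r-1) N, c) ++
        piece planet (PySem.Int.mod (r+1) N, c) ++
        piece planet (r, PySem.Int.mod (c+1) M) ++
        piece planet (r, PySem.Int.mod (c-1) M)
      else [] := by
  have hN : 0 < N := by omega
  have hM : 0 < M := by omega
  have hrm : PySem.Int.mod (r + 0) N = r := pymod_eq_of _ _ _ 0 hN hr0 hrN (by ring)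
  have hcm : PySem.Int.mod (c + 0) M = c := pymod_eq_of _ _ _ 0 hM hc0 hcM (by ring)
  simp only [List.map_cons, List.map_nil, List.filterMap_cons, List.filterMap_nil,
    sweep_at _ _ _ _ _ _ _ hr0 hrN hc0 hcM, hrm, hcm]
  by_cases h0 : pvAt planet r c = 0
  · simp only [h0, if_true, true_and, piece]
    split_ifs <;> simp_all [sub_eq_add_neg]
  · simp [h0]

-- per-cell bridge: A's lrud equals B's four mod-wrapped pieces
lemma cell_eq (N M r c : Int) (planet : List (List Int))
    (hr0 : 0 ≤ r) (hrN : r < N) (hc0 : 0 ≤ c) (hcM : c < M) :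
    lrud r c N M planet =
      piece planet (PySem.Int.mod (r-1) N, c) ++
      piece planet (PySem.Int.mod (r+1) N, c) ++
      piece planet (r, PySem.Int.mod (c+1) M) ++
      piece planet (r, PySem.Int.mod (c-1) M) := by
  have hN : 0 < N := by omega
  have hM : 0 < M := by omega
  have h1 : PySem.Int.mod (r-1) N = if r - 1 ≥ 0 then r - 1 else N - 1 := by
    split_ifs with h
    · exact pymod_eq_of _ _ _ 0 hN h (by omega) (by ring)
    · exact pymod_eq_of _ _ _ (-1) hN (by omega) (by omega) (by omega)
  have h2 : PySem.Int.mod (r+1) N = if r + 1 < N then r + 1 else 0 := by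
    split_ifs with h
    · exact pymod_eq_of _ _ _ 0 hN (by omega) h (by ring)
    · exact pymod_eq_of _ _ _ 1 hN le_rfl hN (by omega)
  have h3 : PySem.Int.mod (c+1) M = if c + 1 < M then c + 1 else 0 := by
    split_ifs with h
    · exact pymod_eq_of _ _ _ 0 hM (by omega) h (by ring)
    · exact pymod_eq_of _ _ _ 1 hM le_rfl hM (by omega)
  have h4 : PySem.Int.mod (c-1) M = if c - 1 ≥ 0 then c - 1 else M - 1 := by
    split_ifs with h
    · exact pymod_eq_of _ _ _ 0 hM h (by omega) (by ring)
    · exact pymod_eq_of _ _ _ (-1) hM (by omega) (by omega) (by omega)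
  rw [lrud_eq, h1, h2, h3, h4]

-- ===== VERDICT (by name: the statement is the Claim_ definition above) =====
theorem hashPlanet_spec : Claim_equal_hashPlanet := by
  intro N M planet _hDom _hPre
  unfold Spec_hashPlanet hashPlanet hashPlanet_alt
  refine List.map_congr_left (fun r hr => ?_)
  refine List.map_congr_left (fun c hc => ?_)
  rw [PySem.List.mem_pyRange_one] at hr hc
  rw [alt_cell_eq N M r c planet hr.1 hr.2 hc.1 hc.2]
  split_ifs with h
  · rw [PySem.List.foldl_append_singleton, List.nil_append]
    exact cell_eq N M r c planet hr.1 hr.2 hc.1 hc.2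
  · rfl
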